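-- pv_equiv track=rewrite | github.com/NiaTheGreat/activewear-agent | src/tools/evaluator.py | _methods_related
-- ===== SOURCE A (Python) =====
-- from typing import Any, Dict, List, Optional
--
-- METHOD_FAMILIES = {
--     "sublimation": [
--         "sublimation printing", "sublimation", "dye sublimation", "dye-sublimation",
--     ],
--     "screen printing": [
--         "screen printing", "silk screen", "silkscreen", "screen print",
--     ],
--     "digital printing": ["digital printing", "dtg", "direct to garment"],
--     "cut and sew": [
--         "cut-and-sew", "cut and sew", "cmt", "cut make trim", "cut & sew",
--     ],
--     "seamless knitting": ["seamless knitting", "seamless", "seamless construction"],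
--     "circular knitting": ["circular knitting", "circular knit"],
--     "warp knitting": ["warp knitting", "warp knit"],
--     "knitting": ["knitting", "flat knitting", "flatbed knitting"],
--     "printing": [
--         "sublimation", "screen printing", "digital printing",
--         "heat transfer", "heat press",
--     ],
--     "finishing": [
--         "anti-microbial", "antimicrobial", "moisture wicking",
--         "anti-shrink", "dwr", "water repellent",
--     ],
--     "dyeing": ["dyeing", "garment dyeing", "piece dyeing", "yarn dyeing", "dye"],
--     "embroidery": ["embroidery", "embroidered"],
--     "laser cutting": ["laser cutting", "laser cut"],
-- }
--
-- def _methods_related(target: str, mfr_methods: List[str]) -> bool: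
--     """Check if *target* is in the same method family as any manufacturer method."""
--     for members in METHOD_FAMILIES.values():
--         target_in = any(m in target or target in m for m in members)
--         if target_in:
--             for mfr_method in mfr_methods:
--                 if any(m in mfr_method or mfr_method in m for m in members):
--                     return True
--     return False
-- ===== SOURCE B (Python) =====
-- from typing import Any, Dict, List, Optional
--
-- METHOD_FAMILIES = {
--     "sublimation": [
--         "sublimation printing", "sublimation", "dye sublimation", "dye-sublimation",
--     ],
--     "screen printing": [
--         "screen printing", "silk screen", "silkscreen", "screen print",
--     ],
--     "digital printing": ["digital printing", "dtg", "direct to garment"],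
--     "cut and sew": [
--         "cut-and-sew", "cut and sew", "cmt", "cut make trim", "cut & sew",
--     ],
--     "seamless knitting": ["seamless knitting", "seamless", "seamless construction"],
--     "circular knitting": ["circular knitting", "circular knit"],
--     "warp knitting": ["warp knitting", "warp knit"],
--     "knitting": ["knitting", "flat knitting", "flatbed knitting"],
--     "printing": [
--         "sublimation", "screen printing", "digital printing",
--         "heat transfer", "heat press",
--     ],
--     "finishing": [
--         "anti-microbial", "antimicrobial", "moisture wicking",
--         "anti-shrink", "dwr", "water repellent",
--     ],
--     "dyeing": ["dyeing", "garment dyeing", "piece dyeing", "yarn dyeing", "dye"],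
--     "embroidery": ["embroidery", "embroidered"],
--     "laser cutting": ["laser cutting", "laser cut"],
-- }
--
-- def _family_mask(s: str) -> int:
--     """Bitmask of the families *s* belongs to (bit i = i-th family)."""
--     mask = 0
--     for i, members in enumerate(METHOD_FAMILIES.values()):
--         if any(m in s or s in m for m in members):
--             mask |= 1 << i
--     return mask
--
-- def _methods_related(target: str, mfr_methods: List[str]) -> bool:
--     """Related iff target's family bitmask intersects the union of the
--     manufacturer methods' family bitmasks."""
--     acc = 0
--     for mm in mfr_methods:
--         acc |= _family_mask(mm)
--     return (_family_mask(target) & acc) != 0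
-- ===== Notes on version B (the rewrite author's own statement) =====
-- stated objective: alternative
-- what changed: B encodes family membership as integer bitmasks (bit i = i-th family), ORs the masks of all manufacturer methods into one accumulator and answers with a single bitwise AND test, replacing A's nested per-family early-return scan over mfr_methods.
import Mathlib
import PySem

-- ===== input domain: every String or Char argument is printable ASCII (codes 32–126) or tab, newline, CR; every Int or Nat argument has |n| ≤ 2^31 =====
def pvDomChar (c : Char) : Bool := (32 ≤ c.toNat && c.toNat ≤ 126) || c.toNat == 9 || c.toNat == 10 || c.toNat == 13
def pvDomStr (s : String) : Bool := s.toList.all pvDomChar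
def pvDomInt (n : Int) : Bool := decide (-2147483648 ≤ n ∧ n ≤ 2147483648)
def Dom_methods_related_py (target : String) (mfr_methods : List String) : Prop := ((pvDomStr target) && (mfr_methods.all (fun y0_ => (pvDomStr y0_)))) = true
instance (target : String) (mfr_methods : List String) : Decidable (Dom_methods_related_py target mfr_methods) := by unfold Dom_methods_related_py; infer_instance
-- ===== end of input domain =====

-- B replaces A's nested per-family scan by integer family BITMASKS: bit i of a
-- string's mask says it matches family i; relatedness is a bitwise AND test
-- between target's mask and the OR of the manufacturer methods' masks
-- (objective: alternative algorithm/data structure; same result).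

-- METHOD_FAMILIES.values(), in insertion order (shared constant of the module).
def methodFamilies : List (List String) :=
  [ ["sublimation printing", "sublimation", "dye sublimation", "dye-sublimation"],
    ["screen printing", "silk screen", "silkscreen", "screen print"],
    ["digital printing", "dtg", "direct to garment"],
    ["cut-and-sew", "cut and sew", "cmt", "cut make trim", "cut & sew"],
    ["seamless knitting", "seamless", "seamless construction"],
    ["circular knitting", "circular knit"],
    ["warp knitting", "warp knit"],
    ["knitting", "flat knitting", "flatbed knitting"],
    ["sublimation", "screen printing", "digital printing", "heat transfer", "heat press"],
    ["anti-microbial", "antimicrobial", "moisture wicking", "anti-shrink", "dwr", "water repellent"],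
    ["dyeing", "garment dyeing", "piece dyeing", "yarn dyeing", "dye"],
    ["embroidery", "embroidered"],
    ["laser cutting", "laser cut"] ]

-- 'm in x or x in m'
def pvMatch (m x : String) : Bool := PySem.Str.isIn m x || PySem.Str.isIn x m

-- ===== PORT A =====
-- the outer 'for members in METHOD_FAMILIES.values()' loop, with its early return
def mrGoA (target : String) (mfr_methods : List String) : List (List String) → Bool
  | [] => false
  | members :: rest =>
    let target_in := members.any (fun m => pvMatch m target)
    if target_in then
      if mfr_methods.any (fun mfr_method => members.any (fun m => pvMatch m mfr_method)) then
        true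
      else mrGoA target mfr_methods rest
    else mrGoA target mfr_methods rest

def methods_related_py (target : String) (mfr_methods : List String) : Bool :=
  mrGoA target mfr_methods methodFamilies

-- ===== PORT B =====
-- _family_mask: 'for i, members in enumerate(...): if match: mask |= 1 << i'
-- (structural recursion carrying the index i; the running |= accumulator of the
-- Python loop is the same OR of the same bits)
def maskGo (s : String) (i : Nat) : List (List String) → Nat
  | [] => 0
  | members :: rest =>
    (if members.any (fun m => pvMatch m s) then (1 <<< i) else 0) ||| maskGo s (i + 1) rest

def familyMask (s : String) : Nat := maskGo s 0 methodFamilies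

def methods_related_py_alt (target : String) (mfr_methods : List String) : Bool :=
  let acc := mfr_methods.foldl (fun a mm => a ||| familyMask mm) 0
  (familyMask target &&& acc) != 0

-- ===== PRECONDITION & SPEC =====
def Spec_methods_related_py (target : String) (mfr_methods : List String) (out : Bool) : Prop := out = methods_related_py_alt target mfr_methods
instance (target : String) (mfr_methods : List String) (out : Bool) : Decidable (Spec_methods_related_py target mfr_methods out) := by unfold Spec_methods_related_py; infer_instance

-- ===== CLAIM (what is proved, stated in full; the proofs are below) =====
def Claim_equal_methods_related_py : Prop := ∀ (target : String) (mfr_methods : List String), Dom_methods_related_py target mfr_methods → Spec_methods_related_py target mfr_methods (methods_related_py target mfr_methods)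

-- ===== LEMMAS AND PROOFS =====

-- whether s matches family number k (out-of-range families match nothing)
def famAt (fams : List (List String)) (k : Nat) (s : String) : Bool :=
  (fams.getD k []).any (fun m => pvMatch m s)

theorem testBit_one' (i : Nat) : Nat.testBit 1 i = decide (i = 0) := by
  cases i with
  | zero => rfl
  | succ n => simp [Nat.testBit_succ]

-- bit k of maskGo s i fams is set iff k ≥ i and s matches family k - i
theorem testBit_maskGo (s : String) (fams : List (List String)) :
    ∀ (i k : Nat), (maskGo s i fams).testBit k = (decide (i ≤ k) && famAt fams (k - i) s) := by
  induction fams with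
  | nil => intro i k; simp [maskGo, famAt]
  | cons f rest ih =>
    intro i k
    simp only [maskGo, Nat.testBit_or]
    rcases Nat.lt_trichotomy k i with hlt | heq | hgt
    · have h1 : ¬ i ≤ k := by omega
      have h2 : ¬ i + 1 ≤ k := by omega
      split
      · simp [Nat.testBit_shiftLeft, ih, h1, h2]
      · simp [ih, h1, h2]
    · subst heq
      have h2 : ¬ k + 1 ≤ k := by omega
      split
      · simp_all [Nat.testBit_shiftLeft, famAt]
      · simp_all [famAt]
    · have h1 : i ≤ k := by omega
      have h2 : i + 1 ≤ k := by omega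
      have h3 : k - i ≠ 0 := by omega
      have h4 : k - i = (k - (i + 1)) + 1 := by omega
      have h5 : famAt (f :: rest) (k - i) s = famAt rest (k - (i + 1)) s := by
        rw [h4]; simp [famAt]
      split
      · simp [Nat.testBit_shiftLeft, testBit_one', ih, h1, h2, h3, h5]
      · simp [ih, h1, h2, h5]

theorem testBit_familyMask (s : String) (k : Nat) :
    (familyMask s).testBit k = famAt methodFamilies k s := by
  simp [familyMask, testBit_maskGo]

-- bit k of the OR-accumulator over mfr_methods
theorem testBit_foldl_or (mfr : List String) :
    ∀ (init : Nat) (k : Nat),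
      (mfr.foldl (fun a mm => a ||| familyMask mm) init).testBit k
        = (init.testBit k || mfr.any (fun mm => famAt methodFamilies k mm)) := by
  induction mfr with
  | nil => intro init k; simp
  | cons mm rest ih =>
    intro init k
    simp [List.foldl_cons, ih, Nat.testBit_or, testBit_familyMask, Bool.or_assoc]

-- any over the family list ↔ exists a family number (with getD)
theorem any_iff_exists_getD (fams : List (List String)) (p : List String → Bool)
    (hp : p [] = false) : fams.any p = true ↔ ∃ k, p (fams.getD k []) = true := by
  constructor
  · intro h
    rcases List.any_eq_true.mp h with ⟨f, hf, hpf⟩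
    rcases List.mem_iff_getElem.mp hf with ⟨k, hk, hfk⟩
    exact ⟨k, by rwa [List.getD_eq_getElem fams [] hk, hfk]⟩
  · rintro ⟨k, hk⟩
    by_cases hlt : k < fams.length
    · exact List.any_eq_true.mpr ⟨fams[k], List.getElem_mem hlt,
        by rwa [List.getD_eq_getElem fams [] hlt] at hk⟩
    · rw [List.getD_eq_default fams [] (by omega)] at hk
      rw [hp] at hk; exact absurd hk (by simp)

-- A's early-return nested loop, as one boolean 'any' over the families
theorem mrGoA_eq_any (target : String) (mfr_methods : List String) (fams : List (List String)) :
    mrGoA target mfr_methods fams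
      = fams.any (fun f => f.any (fun m => pvMatch m target)
          && mfr_methods.any (fun mm => f.any (fun m => pvMatch m mm))) := by
  induction fams with
  | nil => rfl
  | cons f rest ih =>
    simp only [mrGoA, List.any_cons]
    cases h : f.any (fun m => pvMatch m target) with
    | true =>
      cases hm : mfr_methods.any (fun mm => f.any (fun m => pvMatch m mm)) with
      | true => simp
      | false => simpa using ih
    | false => simpa using ih

-- ===== VERDICT (by name: the statement is the Claim_ definition above) =====
theorem methods_related_py_spec : Claim_equal_methods_related_py := by
  intro target mfr_methods _
  unfold Spec_methods_related_py methods_related_py methods_related_py_alt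
  rw [mrGoA_eq_any]
  rw [Bool.eq_iff_iff]
  simp only [bne_iff_ne, ne_eq]
  rw [any_iff_exists_getD _ _ (by simp)]
  constructor
  · rintro ⟨k, hk⟩
    intro hzero
    have := congrArg (fun x => Nat.testBit x k) hzero
    simp only [Nat.testBit_and, testBit_familyMask, testBit_foldl_or, Nat.zero_testBit,
      Bool.false_or] at this
    simp only [Bool.and_eq_true] at hk
    rw [show famAt methodFamilies k target = (methodFamilies.getD k []).any
        (fun m => pvMatch m target) from rfl] at this
    simp only [famAt] at this
    rw [hk.1, hk.2] at this
    exact absurd this (by simp)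
  · intro hne
    rcases Nat.exists_testBit_of_ne_zero hne with ⟨k, hbit⟩
    refine ⟨k, ?_⟩
    rw [Bool.and_eq_true]
    simpa only [Nat.testBit_and, testBit_familyMask, testBit_foldl_or, Nat.zero_testBit,
      Bool.false_or, Bool.and_eq_true, famAt] using hbit
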